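-- pv_equiv track=rewrite | github.com/lucylililiwang/normalizer | app.py | detect_non_numeric_columns
-- ===== SOURCE A (Python) =====
-- def detect_non_numeric_columns(csv_data, numeric_columns):
--     """
--     Detect non-numeric data in columns expected to contain numeric values.
--
--     Args:
--         csv_data (list of lists): List of rows from the CSV file where each row is represented as a list of values.
--         numeric_columns (list of int): Indices of columns expected to contain numeric values.
--
--     Returns:
--         list: indices of columns containing non-numeric data.
--     """
--     non_numeric_columns = []
--     for column_index in numeric_columns:
--         for row in csv_data:
--             try:
--                 # We are Attempt to convert the cell value to a numeric type
--                 float(row[column_index])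
--             except ValueError:
--                 # when conversion fails, the column contains non-numeric data
--                 if column_index not in non_numeric_columns:
--                     non_numeric_columns.append(column_index)
--                 break
--     return non_numeric_columns
-- ===== SOURCE B (Python) =====
-- def detect_non_numeric_columns(csv_data, numeric_columns):
--     """Row-major single pass: keep a pending set of columns not yet flagged and a
--     flagged set; scan each row once over the still-pending columns, moving a
--     column to flagged on ValueError; stop early once nothing is pending.
--     Finally emit flagged columns in numeric_columns order, de-duplicated."""
--     pending = set(numeric_columns)
--     flagged = set()
--     for row in csv_data:
--         if not pending:
--             break
--         for col in list(pending):
--             try: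
--                 float(row[col])
--             except ValueError:
--                 pending.discard(col)
--                 flagged.add(col)
--     out = []
--     for c in numeric_columns:
--         if c in flagged and c not in out:
--             out.append(c)
--     return out
-- ===== Notes on version B (the rewrite author's own statement) =====
-- stated objective: alternative
-- what changed: Column-major rescan of csv_data per column (with per-column break) is replaced by a single row-major pass maintaining pending/flagged sets with a global early exit once every column is flagged, followed by an in-order de-duplicating emit over numeric_columns.
-- outside the precondition, e.g. on detect_non_numeric_columns([['x', 'y'], ['1']], [1]): A returns [1], B returns [1]
import Mathlib
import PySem

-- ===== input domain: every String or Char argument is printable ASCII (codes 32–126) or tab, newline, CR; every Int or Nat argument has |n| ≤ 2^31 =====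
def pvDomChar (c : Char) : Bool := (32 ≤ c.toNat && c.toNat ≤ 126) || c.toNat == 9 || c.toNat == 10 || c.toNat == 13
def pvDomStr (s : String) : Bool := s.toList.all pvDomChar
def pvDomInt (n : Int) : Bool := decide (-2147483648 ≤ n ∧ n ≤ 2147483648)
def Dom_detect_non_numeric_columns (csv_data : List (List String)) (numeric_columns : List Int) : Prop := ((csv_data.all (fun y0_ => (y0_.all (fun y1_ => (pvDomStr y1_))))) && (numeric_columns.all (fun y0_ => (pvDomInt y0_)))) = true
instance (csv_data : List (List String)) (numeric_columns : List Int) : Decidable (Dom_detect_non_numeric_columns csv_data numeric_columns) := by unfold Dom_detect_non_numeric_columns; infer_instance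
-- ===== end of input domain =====

-- B replaces A's column-major rescan by one row-major pass over pending/flagged sets,
-- with Python float() acceptance modelled as a character DFA instead of A's recursive-descent parser
-- (alternative decomposition, same cost).


-- ===== PORT A =====
-- A-side model of Python float(s) ACCEPTANCE (True = no ValueError), written as a recursive-
-- descent parser; exact on the ASCII domain: strip, optional sign, inf/infinity/nan (any case),
-- or decimal mantissa with optional fraction and exponent, underscores only between digits.
def pvDigitsTail : List Char → List Char
  | [] => []
  | [c] => if c.isDigit then [] else [c]
  | c :: d :: rest =>
    if c.isDigit then pvDigitsTail (d :: rest)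
    else if c == '_' && d.isDigit then pvDigitsTail rest
    else c :: d :: rest

def pvDigits : List Char → Option (List Char)
  | c :: rest => if c.isDigit then some (pvDigitsTail rest) else none
  | [] => none

def pvMantissa (cs : List Char) : Option (List Char) :=
  match pvDigits cs with
  | some r1 =>
    match r1 with
    | '.' :: r2 => match pvDigits r2 with | some r3 => some r3 | none => some r2
    | _ => some r1
  | none => match cs with
    | '.' :: r2 => pvDigits r2
    | _ => none

def pvFloatOkC (cs0 : List Char) : Bool :=
  let cs := match cs0 with
    | c :: r => if c == '+' || c == '-' then r else c :: r
    | [] => []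
  let low := PySem.Chars.lower cs
  if low == "inf".toList || low == "infinity".toList || low == "nan".toList then true
  else
    match pvMantissa cs with
    | none => false
    | some [] => true
    | some (c :: r) =>
      if c == 'e' || c == 'E' then
        let r' := match r with
          | d :: r' => if d == '+' || d == '-' then r' else d :: r'
          | [] => []
        match pvDigits r' with | some [] => true | _ => false
      else false

def pvFloatOk (s : String) : Bool := pvFloatOkC (PySem.Chars.strip s.toList)

-- A's inner loop: 'for row in csv_data: try float(row[c]) except ValueError: append if new; break'
-- (the 'none' = IndexError case is excluded by Pre_; the port returns acc there)
def aScanCol (rows : List (List String)) (c : Int) (acc : List Int) : List Int :=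
  match rows with
  | [] => acc
  | row :: rs =>
    match PySem.List.pyGet? row c with
    | none => acc
    | some cell =>
      if pvFloatOk cell then aScanCol rs c acc
      else if acc.contains c then acc else acc ++ [c]

def detect_non_numeric_columns (csv_data : List (List String)) (numeric_columns : List Int) : List Int :=
  numeric_columns.foldl (fun acc c => aScanCol csv_data c acc) []

-- ===== PORT B =====
-- B-side model of the same Python float(s) acceptance, written instead as a character DFA
-- (states 0..11, 9 = dead); proved equal to A's parser in bFloatOk_eq below.
def bStep (q : Nat) (c : Char) : Nat :=
  match q with
  | 0 => if c.isDigit then 1 else if c == '.' then 2 else 9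
  | 1 => if c.isDigit then 1 else if c == '_' then 4 else if c == '.' then 6
         else if c == 'e' || c == 'E' then 3 else 9
  | 2 => if c.isDigit then 7 else 9
  | 3 => if c.isDigit then 5 else if c == '+' || c == '-' then 10 else 9
  | 4 => if c.isDigit then 1 else 9
  | 5 => if c.isDigit then 5 else if c == '_' then 11 else 9
  | 6 => if c.isDigit then 7 else if c == 'e' || c == 'E' then 3 else 9
  | 7 => if c.isDigit then 7 else if c == '_' then 8 else if c == 'e' || c == 'E' then 3 else 9
  | 8 => if c.isDigit then 7 else 9
  | 10 => if c.isDigit then 5 else 9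
  | 11 => if c.isDigit then 5 else 9
  | _ => 9

def bAccept (q : Nat) : Bool := q == 1 || q == 6 || q == 7 || q == 5
def bDfa (cs : List Char) : Bool := bAccept (cs.foldl bStep 0)

def bFloatOk (s : String) : Bool :=
  let cs := PySem.Chars.strip s.toList
  let body := cs.drop (if cs.head? == some '+' || cs.head? == some '-' then 1 else 0)
  (["inf", "infinity", "nan"].map String.toList).any (fun w => PySem.Chars.lower body == w)
    || bDfa body

-- one row: 'for col in list(pending): try float(row[col]) except ValueError: discard/add'
-- (the 'none' = IndexError case is excluded by Pre_; the port leaves the state unchanged there)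
def bRowStep (row : List String) (pf : PySem.Set Int × PySem.Set Int) : PySem.Set Int × PySem.Set Int :=
  pf.1.foldl (fun pf' col =>
    match PySem.List.pyGet? row col with
    | none => pf'
    | some cell =>
      if bFloatOk cell then pf'
      else (PySem.Set.discard pf'.1 col, PySem.Set.add pf'.2 col)) pf

def bGo (rows : List (List String)) (pending flagged : PySem.Set Int) : PySem.Set Int :=
  match rows with
  | [] => flagged
  | row :: rs =>
    if pending.isEmpty then flagged
    else
      let pf := bRowStep row (pending, flagged)
      bGo rs pf.1 pf.2

def detect_non_numeric_columns_alt (csv_data : List (List String)) (numeric_columns : List Int) : List Int :=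
  let flagged := bGo csv_data (PySem.Set.ofList numeric_columns) PySem.Set.empty
  numeric_columns.foldl (fun out c => if flagged.contains c && !out.contains c then out ++ [c] else out) []

-- ===== PRECONDITION & SPEC =====
-- Pre_ excludes the inputs on which A raises IndexError by requiring every listed column index
-- to be in range for every row; this is slightly narrower than A's exact raising condition, since
-- A (and B) stop scanning a column at its first non-numeric cell and can return normally even
-- though a later row lacks that column — such inputs are excluded here although both programs
-- return (the same value) on them.
def Pre_detect_non_numeric_columns (csv_data : List (List String)) (numeric_columns : List Int) : Prop :=
  ∀ c ∈ numeric_columns, ∀ row ∈ csv_data, (PySem.List.pyGet? row c).isSome = true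
instance (csv_data : List (List String)) (numeric_columns : List Int) : Decidable (Pre_detect_non_numeric_columns csv_data numeric_columns) := by unfold Pre_detect_non_numeric_columns; infer_instance

def pvWitness_detect_non_numeric_columns : List (List String) × List Int :=
  ([["1", "x"], ["2.5", "y"]], [0, 1])

def Spec_detect_non_numeric_columns (csv_data : List (List String)) (numeric_columns : List Int) (out : List Int) : Prop := out = detect_non_numeric_columns_alt csv_data numeric_columns
instance (csv_data : List (List String)) (numeric_columns : List Int) (out : List Int) : Decidable (Spec_detect_non_numeric_columns csv_data numeric_columns out) := by unfold Spec_detect_non_numeric_columns; infer_instance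

-- ===== CLAIM (what is proved, stated in full; the proofs are below) =====
def Claim_equal_detect_non_numeric_columns : Prop := ∀ (csv_data : List (List String)) (numeric_columns : List Int), Dom_detect_non_numeric_columns csv_data numeric_columns → Pre_detect_non_numeric_columns csv_data numeric_columns → Spec_detect_non_numeric_columns csv_data numeric_columns (detect_non_numeric_columns csv_data numeric_columns)

-- ===== LEMMAS AND PROOFS =====

-- ---- the two float-acceptance models agree ----

theorem foldl_dead (cs : List Char) : cs.foldl bStep 9 = 9 := by
  induction cs with
  | nil => rfl
  | cons c t ih => simpa [bStep] using ih

theorem foldl_run (q qu : Nat)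
    (hd : ∀ c, c.isDigit = true → bStep q c = q)
    (hu : bStep q '_' = qu)
    (hud : ∀ c, c.isDigit = true → bStep qu c = q) :
    ∀ cs, cs.foldl bStep q = (pvDigitsTail cs).foldl bStep q := by
  intro cs
  induction cs using pvDigitsTail.induct with
  | case1 => rfl
  | case2 c hc => simp [pvDigitsTail, hc, hd c hc]
  | case3 c hc => simp [pvDigitsTail, hc]
  | case4 c d rest hc ih =>
    simp only [List.foldl_cons]
    rw [hd c hc]
    simpa [pvDigitsTail, hc] using ih
  | case5 c d rest hc h2 ih =>
    have hcu : c = '_' := beq_iff_eq.mp ((Bool.and_eq_true _ _).mp h2).1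
    have hdd : d.isDigit = true := ((Bool.and_eq_true _ _).mp h2).2
    subst hcu
    simp only [List.foldl_cons]
    rw [hu, hud d hdd]
    simpa [pvDigitsTail, hc, h2, hdd] using ih
  | case6 c d rest hc h2 => simp [pvDigitsTail, hc, h2]

def tailOk : List Char → Prop
  | [] => True
  | c :: r => c.isDigit = false ∧ (c = '_' → match r with | d :: _ => d.isDigit = false | [] => True)

theorem tailOk_pvDigitsTail (cs : List Char) : tailOk (pvDigitsTail cs) := by
  induction cs using pvDigitsTail.induct with
  | case1 => trivial
  | case2 c hc => simp [pvDigitsTail, hc, tailOk]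
  | case3 c hc =>
    have hcf : c.isDigit = false := by simpa using hc
    simp [pvDigitsTail, hcf, tailOk]
  | case4 c d rest hc ih => simpa [pvDigitsTail, hc] using ih
  | case5 c d rest hc h2 ih => simpa [pvDigitsTail, hc, h2] using ih
  | case6 c d rest hc h2 =>
    have hcf : c.isDigit = false := by simpa using hc
    have hred : pvDigitsTail (c :: d :: rest) = c :: d :: rest := by
      simp [pvDigitsTail, hcf, h2]
    rw [hred]
    refine ⟨hcf, ?_⟩
    intro he
    subst he
    have hdd : d.isDigit = false := by
      by_contra hdt
      simp only [Bool.not_eq_false] at hdt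
      exact h2 (by simp [hdt])
    simpa using hdd

theorem accept5_tail (r : List Char) (h : tailOk r) :
    bAccept (r.foldl bStep 5) = r.isEmpty := by
  cases r with
  | nil => rfl
  | cons c t =>
    obtain ⟨hc, hcu⟩ := h
    by_cases hu : c = '_'
    · subst hu
      cases t with
      | nil => simp [bStep, bAccept]
      | cons d t' =>
        have hdd : d.isDigit = false := hcu rfl
        simp [bStep, hdd, foldl_dead, bAccept]
    · have h9 : bStep 5 c = 9 := by simp [bStep, hc, hu]
      simp [h9, foldl_dead, bAccept]

theorem accept3_exp (r : List Char) :
    bAccept (r.foldl bStep 3)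
      = (match pvDigits (match r with
            | d :: r' => if d == '+' || d == '-' then r' else d :: r'
            | [] => []) with
         | some [] => true | _ => false) := by
  cases r with
  | nil => rfl
  | cons d r' =>
    by_cases hd : d.isDigit = true
    · have hp : d ≠ '+' := by intro h; subst h; exact absurd hd (by decide)
      have hm : d ≠ '-' := by intro h; subst h; exact absurd hd (by decide)
      have hsign : (d == '+' || d == '-') = false := by simp [hp, hm]
      have h35 : bStep 3 d = 5 := by simp [bStep, hd]
      simp only [List.foldl_cons, h35, hsign, Bool.false_eq_true, if_false]
      rw [foldl_run 5 11 (by intro x hx; simp [bStep, hx]) (by decide)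
            (by intro x hx; simp [bStep, hx]),
          accept5_tail _ (tailOk_pvDigitsTail r')]
      simp only [pvDigits, hd, if_true]
      cases hres : pvDigitsTail r' <;> simp
    · by_cases hs : (d == '+' || d == '-') = true
      · have h310 : bStep 3 d = 10 := by simp [bStep, hd, hs]
        simp only [List.foldl_cons, h310, hs, if_true]
        cases r' with
        | nil => rfl
        | cons e t =>
          by_cases he : e.isDigit = true
          · have h105 : bStep 10 e = 5 := by simp [bStep, he]
            simp only [List.foldl_cons, h105]
            rw [foldl_run 5 11 (by intro x hx; simp [bStep, hx]) (by decide)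
                  (by intro x hx; simp [bStep, hx]),
                accept5_tail _ (tailOk_pvDigitsTail t)]
            simp only [pvDigits, he, if_true]
            cases hres : pvDigitsTail t <;> simp
          · have h9 : bStep 10 e = 9 := by simp [bStep, he]
            simp [h9, foldl_dead, bAccept, pvDigits, he]
      · have h9 : bStep 3 d = 9 := by simp [bStep, hd, hs]
        simp [h9, foldl_dead, bAccept, pvDigits, hd, hs]

def pvExpOk (r : List Char) : Bool :=
  match pvDigits (match r with
      | d :: r' => if d == '+' || d == '-' then r' else d :: r'
      | [] => []) with
  | some [] => true | _ => false

def pvContOk : List Char → Bool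
  | [] => true
  | c :: r => if c == 'e' || c == 'E' then pvExpOk r else false

theorem accept3_exp' (r : List Char) : bAccept (r.foldl bStep 3) = pvExpOk r := by
  rw [accept3_exp]
  cases r with
  | nil => rfl
  | cons d r' =>
    by_cases hs : (d == '+' || d == '-') = true
    · simp [pvExpOk, hs]
    · have hs' : (d == '+' || d == '-') = false := by simpa using hs
      simp [pvExpOk, hs']

theorem tailOk_head {r : List Char} (h : tailOk r) : ∀ d t, r = d :: t → d.isDigit = false := by
  intro d t he; subst he; exact h.1

theorem tailOk_us {r : List Char} (h : tailOk r) :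
    ∀ t d t', r = '_' :: t → t = d :: t' → d.isDigit = false := by
  intro t d t' he ht; subst he; subst ht; exact h.2 rfl

theorem pvDigits_none_head {r : List Char} (h : pvDigits r = none) :
    ∀ d t, r = d :: t → d.isDigit = false := by
  intro d t he; subst he
  by_contra hx
  simp only [Bool.not_eq_false] at hx
  simp [pvDigits, hx] at h

theorem pvDigits_some {r r3 : List Char} (h : pvDigits r = some r3) :
    ∃ d t, r = d :: t ∧ d.isDigit = true ∧ r3 = pvDigitsTail t := by
  cases r with
  | nil => simp [pvDigits] at h
  | cons d t =>
    by_cases hd : d.isDigit = true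
    · refine ⟨d, t, rfl, hd, ?_⟩
      have := h
      simp only [pvDigits, hd, if_true, Option.some.injEq] at this
      exact this.symm
    · simp [pvDigits, hd] at h

theorem accept_after (q : Nat) (hq : q = 1 ∨ q = 6 ∨ q = 7) (r : List Char)
    (hhead : ∀ d t, r = d :: t → d.isDigit = false)
    (hus : (q = 1 ∨ q = 7) → ∀ t d t', r = '_' :: t → t = d :: t' → d.isDigit = false)
    (hdot : q = 1 → r.head? ≠ some '.') :
    bAccept (r.foldl bStep q) = pvContOk r := by
  cases r with
  | nil => rcases hq with h | h | h <;> subst h <;> rfl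
  | cons c rest =>
    have hc : c.isDigit = false := hhead c rest rfl
    by_cases he : (c == 'e' || c == 'E') = true
    · have h3 : bStep q c = 3 := by
        have h1 : c ≠ '_' := by
          rcases (Bool.or_eq_true _ _).mp he with h | h <;>
            (have := beq_iff_eq.mp h; subst this; decide)
        have h2 : c ≠ '.' := by
          rcases (Bool.or_eq_true _ _).mp he with h | h <;>
            (have := beq_iff_eq.mp h; subst this; decide)
        rcases hq with h | h | h <;> subst h <;> simp [bStep, hc, h1, h2, he]
      rw [List.foldl_cons, h3, accept3_exp']
      simp [pvContOk, he]
    · have hef : (c == 'e' || c == 'E') = false := by simpa using he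
      by_cases hu : c = '_'
      · subst hu
        rcases hq with h | h | h <;> subst h
        · cases rest with
          | nil => simp [bStep, bAccept, pvContOk]
          | cons d t' =>
            have hdd : d.isDigit = false := hus (Or.inl rfl) _ d t' rfl rfl
            simp [bStep, hdd, foldl_dead, bAccept, pvContOk]
        · simp [bStep, foldl_dead, bAccept, pvContOk]
        · cases rest with
          | nil => simp [bStep, bAccept, pvContOk]
          | cons d t' =>
            have hdd : d.isDigit = false := hus (Or.inr rfl) _ d t' rfl rfl
            simp [bStep, hdd, foldl_dead, bAccept, pvContOk]
      · have h9 : bStep q c = 9 := by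
          rcases hq with h | h | h <;> subst h
          · have hne : c ≠ '.' := by intro hx; exact (hdot rfl) (by simp [hx])
            simp [bStep, hc, hu, hne, hef]
          · simp [bStep, hc, hef]
          · simp [bStep, hc, hu, hef]
        simp [h9, foldl_dead, bAccept, pvContOk, hef]

def pvMEOk (cs : List Char) : Bool :=
  match pvMantissa cs with
  | none => false
  | some r => pvContOk r

theorem pvMantissa_nil {cs : List Char} (h : pvDigits cs = some []) :
    pvMantissa cs = some [] := by
  unfold pvMantissa; rw [h]

theorem pvMantissa_dot_some {cs r2 r3 : List Char} (h : pvDigits cs = some ('.' :: r2))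
    (h2 : pvDigits r2 = some r3) : pvMantissa cs = some r3 := by
  unfold pvMantissa; rw [h]; simp [h2]

theorem pvMantissa_dot_none {cs r2 : List Char} (h : pvDigits cs = some ('.' :: r2))
    (h2 : pvDigits r2 = none) : pvMantissa cs = some r2 := by
  unfold pvMantissa; rw [h]; simp [h2]

theorem pvMantissa_ndot {cs : List Char} {c1 : Char} {r2 : List Char}
    (h : pvDigits cs = some (c1 :: r2)) (hne : c1 ≠ '.') :
    pvMantissa cs = some (c1 :: r2) := by
  unfold pvMantissa
  rw [h]
  split
  · next r3 heq =>
    obtain rfl : c1 :: r2 = r3 := by injection heq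
    split
    · next heq2 => exact absurd (by injection heq2) hne
    · rfl
  · next heq => exact absurd heq (by simp)

theorem pvMantissa_none_dot {r2 : List Char} (h : pvDigits ('.' :: r2) = none) :
    pvMantissa ('.' :: r2) = pvDigits r2 := by
  unfold pvMantissa; rw [h]; simp

theorem pvMantissa_none_ndot {c : Char} {t : List Char} (h : pvDigits (c :: t) = none)
    (hne : c ≠ '.') : pvMantissa (c :: t) = none := by
  unfold pvMantissa
  rw [h]
  split
  · next heq => exact absurd heq (by simp)
  · split
    · next heq2 => exact absurd (by injection heq2) hne
    · rfl

theorem bDfa_eq (cs : List Char) : bDfa cs = pvMEOk cs := by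
  unfold bDfa pvMEOk
  cases cs with
  | nil => rfl
  | cons c t =>
    by_cases hc : c.isDigit = true
    · have h01 : bStep 0 c = 1 := by simp [bStep, hc]
      have hd1 : pvDigits (c :: t) = some (pvDigitsTail t) := by simp [pvDigits, hc]
      rw [List.foldl_cons, h01,
          foldl_run 1 4 (by intro x hx; simp [bStep, hx]) (by decide)
            (by intro x hx; simp [bStep, hx])]
      have ht := tailOk_pvDigitsTail t
      cases hr1 : pvDigitsTail t with
      | nil =>
        rw [hr1] at hd1
        rw [pvMantissa_nil hd1]
        decide
      | cons c1 r2 =>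
        rw [hr1] at ht hd1
        by_cases hdot : c1 = '.'
        · subst hdot
          have h16 : bStep 1 '.' = 6 := by decide
          rw [List.foldl_cons, h16]
          cases hd2 : pvDigits r2 with
          | none =>
            rw [pvMantissa_dot_none hd1 hd2]
            exact accept_after 6 (Or.inr (Or.inl rfl)) r2 (pvDigits_none_head hd2)
              (by rintro (h | h) <;> exact absurd h (by decide))
              (by intro h; exact absurd h (by decide))
          | some r3 =>
            rw [pvMantissa_dot_some hd1 hd2]
            obtain ⟨d, t2, he2, hdd, hr3⟩ := pvDigits_some hd2
            subst he2
            have h67 : bStep 6 d = 7 := by simp [bStep, hdd]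
            rw [List.foldl_cons, h67,
                foldl_run 7 8 (by intro x hx; simp [bStep, hx]) (by decide)
                  (by intro x hx; simp [bStep, hx])]
            have ht3 := tailOk_pvDigitsTail t2
            rw [← hr3] at ht3 ⊢
            exact accept_after 7 (Or.inr (Or.inr rfl)) r3 (tailOk_head ht3)
              (fun _ => tailOk_us ht3) (by intro h; exact absurd h (by decide))
        · rw [pvMantissa_ndot hd1 hdot]
          exact accept_after 1 (Or.inl rfl) (c1 :: r2) (tailOk_head ht)
            (fun _ => tailOk_us ht)
            (by intro _ hx; exact hdot (by simpa using hx))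
    · by_cases hdotc : c = '.'
      · subst hdotc
        have h02 : bStep 0 '.' = 2 := by decide
        have hd0 : pvDigits ('.' :: t) = none := by simp [pvDigits]
        rw [List.foldl_cons, h02, pvMantissa_none_dot hd0]
        cases hd2 : pvDigits t with
        | none =>
          cases t with
          | nil => decide
          | cons d t' =>
            have hdd : d.isDigit = false := pvDigits_none_head hd2 d t' rfl
            have h29 : bStep 2 d = 9 := by simp [bStep, hdd]
            rw [List.foldl_cons, h29, foldl_dead]
            rfl
        | some r3 =>
          obtain ⟨d, t2, he2, hdd, hr3⟩ := pvDigits_some hd2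
          subst he2
          have h27 : bStep 2 d = 7 := by simp [bStep, hdd]
          rw [List.foldl_cons, h27,
              foldl_run 7 8 (by intro x hx; simp [bStep, hx]) (by decide)
                (by intro x hx; simp [bStep, hx])]
          have ht3 := tailOk_pvDigitsTail t2
          rw [← hr3] at ht3 ⊢
          exact accept_after 7 (Or.inr (Or.inr rfl)) r3 (tailOk_head ht3)
            (fun _ => tailOk_us ht3) (by intro h; exact absurd h (by decide))
      · have h09 : bStep 0 c = 9 := by simp [bStep, hc, hdotc]
        have hd0 : pvDigits (c :: t) = none := by simp [pvDigits, hc]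
        rw [List.foldl_cons, h09, pvMantissa_none_ndot hd0 hdotc, foldl_dead]
        rfl


theorem bFloatOk_eq (s : String) : bFloatOk s = pvFloatOk s := by
  simp only [bFloatOk, pvFloatOk, pvFloatOkC]
  generalize PySem.Chars.strip s.toList = cs0
  have hsd : cs0.drop (if cs0.head? == some '+' || cs0.head? == some '-' then 1 else 0)
      = (match cs0 with | c :: r => if c == '+' || c == '-' then r else c :: r | [] => ([] : List Char)) := by
    cases cs0 with
    | nil => rfl
    | cons c r =>
      by_cases h1 : c = '+'
      · subst h1; simp
      · by_cases h2 : c = '-'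
        · subst h2; simp
        · simp [h1, h2]
  rw [hsd]
  generalize (match cs0 with | c :: r => if c == '+' || c == '-' then r else c :: r | [] => ([] : List Char)) = body
  have hw : ((["inf", "infinity", "nan"].map String.toList).any
      (fun w => PySem.Chars.lower body == w))
      = (PySem.Chars.lower body == "inf".toList || PySem.Chars.lower body == "infinity".toList
         || PySem.Chars.lower body == "nan".toList) := by
    simp [Bool.or_assoc]
  rw [hw]
  by_cases hword : (PySem.Chars.lower body == "inf".toList || PySem.Chars.lower body == "infinity".toList
      || PySem.Chars.lower body == "nan".toList) = true
  · rw [hword]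
    simp
  · have hword' : (PySem.Chars.lower body == "inf".toList || PySem.Chars.lower body == "infinity".toList
        || PySem.Chars.lower body == "nan".toList) = false := by simpa using hword
    rw [hword', bDfa_eq]
    simp only [Bool.false_or, Bool.false_eq_true, if_false]
    unfold pvMEOk
    cases hm : pvMantissa body with
    | none => rfl
    | some r =>
      cases r with
      | nil => rfl
      | cons c rr =>
        by_cases he : (c == 'e' || c == 'E') = true
        · simp only [pvContOk, he, if_true]
          unfold pvExpOk
          cases rr with
          | nil => rfl
          | cons d rr' =>
            by_cases hs : (d == '+' || d == '-') = true
            · simp only [hs, if_true]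
            · have hs' : (d == '+' || d == '-') = false := by simpa using hs
              simp only [hs', Bool.false_eq_true, if_false]
        · have he' : (c == 'e' || c == 'E') = false := by simpa using he
          simp only [pvContOk, he', Bool.false_eq_true, if_false]


-- ---- A's column scan and B's row-major pass ----

-- a cell that raises ValueError (in range but not float-parsable)
def cellBad (c : Int) (row : List String) : Bool :=
  match PySem.List.pyGet? row c with
  | some s => !pvFloatOk s
  | none => false

def anyBad (csv : List (List String)) (c : Int) : Bool := csv.any (cellBad c)

-- structural form of "column c's scan does not hit an out-of-range row"
def noRaise (csv : List (List String)) (c : Int) : Bool :=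
  match csv with
  | [] => true
  | row :: rs =>
    match PySem.List.pyGet? row c with
    | none => false
    | some s => if pvFloatOk s then noRaise rs c else true

theorem noRaise_of_pre (csv : List (List String)) (c : Int)
    (h : ∀ row ∈ csv, (PySem.List.pyGet? row c).isSome = true) :
    noRaise csv c = true := by
  induction csv with
  | nil => rfl
  | cons row rs ih =>
    simp only [noRaise]
    cases hg : PySem.List.pyGet? row c with
    | none =>
      have := h row (by simp)
      simp [hg] at this
    | some s =>
      by_cases hf : pvFloatOk s = true
      · simp only [hf, if_true]
        exact ih (fun r hr => h r (by simp [hr]))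
      · simp [hf]

theorem aScanCol_eq (csv : List (List String)) (c : Int) (acc : List Int)
    (h : noRaise csv c = true) :
    aScanCol csv c acc =
      (if anyBad csv c then (if acc.contains c then acc else acc ++ [c]) else acc) := by
  induction csv with
  | nil => simp [aScanCol, anyBad]
  | cons row rs ih =>
    simp only [noRaise] at h
    simp only [aScanCol, anyBad, List.any_cons]
    cases hg : PySem.List.pyGet? row c with
    | none => simp [hg] at h
    | some s =>
      rw [hg] at h
      by_cases hf : pvFloatOk s = true
      · have h' : noRaise rs c = true := by simpa [hf] using h
        simp [hf, ih h', anyBad, cellBad, hg]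
      · simp only [Bool.not_eq_true] at hf
        simp [hf, cellBad, hg]

-- ---- B's row-major pass characterisation ----

theorem bRowStep_fold_mem (row : List String) (s : List Int) (p f : PySem.Set Int) (c : Int) :
    (c ∈ (s.foldl (fun pf' col =>
        match PySem.List.pyGet? row col with
        | none => pf'
        | some cell =>
          if bFloatOk cell then pf'
          else (PySem.Set.discard pf'.1 col, PySem.Set.add pf'.2 col)) (p, f)).1
      ↔ c ∈ p ∧ ¬ (c ∈ s ∧ cellBad c row = true)) ∧
    (c ∈ (s.foldl (fun pf' col =>
        match PySem.List.pyGet? row col with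
        | none => pf'
        | some cell =>
          if bFloatOk cell then pf'
          else (PySem.Set.discard pf'.1 col, PySem.Set.add pf'.2 col)) (p, f)).2
      ↔ c ∈ f ∨ (c ∈ s ∧ cellBad c row = true)) := by
  simp only [bFloatOk_eq]
  induction s generalizing p f with
  | nil => simp
  | cons a t ih =>
    simp only [List.foldl_cons]
    cases hg : PySem.List.pyGet? row a with
    | none =>
      have hb : cellBad a row = false := by simp [cellBad, hg]
      constructor
      · rw [(ih p f).1]
        constructor
        · rintro ⟨hp, hn⟩
          refine ⟨hp, ?_⟩
          rintro ⟨hmem, hbad⟩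
          rcases List.mem_cons.mp hmem with h | h
          · subst h; rw [hb] at hbad; cases hbad
          · exact hn ⟨h, hbad⟩
        · rintro ⟨hp, hn⟩
          exact ⟨hp, fun ⟨hmem, hbad⟩ => hn ⟨List.mem_cons_of_mem _ hmem, hbad⟩⟩
      · rw [(ih p f).2]
        constructor
        · rintro (h | ⟨hmem, hbad⟩)
          · exact Or.inl h
          · exact Or.inr ⟨List.mem_cons_of_mem _ hmem, hbad⟩
        · rintro (h | ⟨hmem, hbad⟩)
          · exact Or.inl h
          · rcases List.mem_cons.mp hmem with h' | h'
            · subst h'; rw [hb] at hbad; cases hbad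
            · exact Or.inr ⟨h', hbad⟩
    | some cell =>
      by_cases hf : pvFloatOk cell = true
      · have hb : cellBad a row = false := by simp [cellBad, hg, hf]
        simp only [hf, if_true]
        constructor
        · rw [(ih p f).1]
          constructor
          · rintro ⟨hp, hn⟩
            refine ⟨hp, ?_⟩
            rintro ⟨hmem, hbad⟩
            rcases List.mem_cons.mp hmem with h | h
            · subst h; rw [hb] at hbad; cases hbad
            · exact hn ⟨h, hbad⟩
          · rintro ⟨hp, hn⟩
            exact ⟨hp, fun ⟨hmem, hbad⟩ => hn ⟨List.mem_cons_of_mem _ hmem, hbad⟩⟩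
        · rw [(ih p f).2]
          constructor
          · rintro (h | ⟨hmem, hbad⟩)
            · exact Or.inl h
            · exact Or.inr ⟨List.mem_cons_of_mem _ hmem, hbad⟩
          · rintro (h | ⟨hmem, hbad⟩)
            · exact Or.inl h
            · rcases List.mem_cons.mp hmem with h' | h'
              · subst h'; rw [hb] at hbad; cases hbad
              · exact Or.inr ⟨h', hbad⟩
      · simp only [Bool.not_eq_true] at hf
        have hb : cellBad a row = true := by simp [cellBad, hg, hf]
        simp only [hf, Bool.false_eq_true, if_false]
        constructor
        · rw [(ih _ _).1]
          simp only [PySem.Set.mem_discard]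
          constructor
          · rintro ⟨⟨hp, hne⟩, hn⟩
            refine ⟨hp, ?_⟩
            rintro ⟨hmem, hbad⟩
            rcases List.mem_cons.mp hmem with h | h
            · exact hne h
            · exact hn ⟨h, hbad⟩
          · rintro ⟨hp, hn⟩
            have hne : c ≠ a := fun h => hn ⟨by simp [h], by rw [h]; exact hb⟩
            exact ⟨⟨hp, hne⟩, fun ⟨hmem, hbad⟩ => hn ⟨List.mem_cons_of_mem _ hmem, hbad⟩⟩
        · rw [(ih _ _).2]
          simp only [PySem.Set.mem_add]
          constructor
          · rintro ((h | h) | ⟨hmem, hbad⟩)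
            · exact Or.inl h
            · exact Or.inr ⟨by simp [h], by rw [h]; exact hb⟩
            · exact Or.inr ⟨List.mem_cons_of_mem _ hmem, hbad⟩
          · rintro (h | ⟨hmem, hbad⟩)
            · exact Or.inl (Or.inl h)
            · rcases List.mem_cons.mp hmem with h' | h'
              · exact Or.inl (Or.inr h')
              · exact Or.inr ⟨h', hbad⟩

theorem bGo_mem (csv : List (List String)) (pending flagged : PySem.Set Int) (c : Int) :
    c ∈ bGo csv pending flagged ↔ c ∈ flagged ∨ (c ∈ pending ∧ anyBad csv c = true) := by
  induction csv generalizing pending flagged with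
  | nil => simp [bGo, anyBad]
  | cons row rs ih =>
    simp only [bGo]
    by_cases he : pending.isEmpty = true
    · have hp : pending = [] := List.isEmpty_iff.mp he
      simp [hp]
    · have hf : pending.isEmpty = false := by simpa using he
      simp only [hf, Bool.false_eq_true, if_false]
      rw [ih]
      have hstep := bRowStep_fold_mem row pending pending flagged c
      simp only [bRowStep]
      rw [hstep.1, hstep.2]
      simp only [anyBad, List.any_cons, Bool.or_eq_true]
      constructor
      · rintro ((h | ⟨hp, hbad⟩) | ⟨⟨hp, hn⟩, hany⟩)
        · exact Or.inl h
        · exact Or.inr ⟨hp, Or.inl hbad⟩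
        · exact Or.inr ⟨hp, Or.inr hany⟩
      · rintro (h | ⟨hp, hbad | hany⟩)
        · exact Or.inl (Or.inl h)
        · exact Or.inl (Or.inr ⟨hp, hbad⟩)
        · by_cases hb : cellBad c row = true
          · exact Or.inl (Or.inr ⟨hp, hb⟩)
          · exact Or.inr ⟨⟨hp, fun ⟨_, h2⟩ => hb h2⟩, hany⟩

theorem flagged_contains (csv : List (List String)) (numeric : List Int) (c : Int) (hc : c ∈ numeric) :
    (bGo csv (PySem.Set.ofList numeric) PySem.Set.empty).contains c = anyBad csv c := by
  rcases hb : anyBad csv c with _ | _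
  · refine Bool.eq_false_iff.mpr ?_
    intro htrue
    have hm : c ∈ bGo csv (PySem.Set.ofList numeric) PySem.Set.empty :=
      (PySem.Set.contains_iff _ _).mp htrue
    rcases (bGo_mem csv _ _ c).mp hm with h | ⟨_, h⟩
    · simp [PySem.Set.empty] at h
    · rw [hb] at h; cases h
  · exact (PySem.Set.contains_iff _ _).mpr
      ((bGo_mem csv _ _ c).mpr (Or.inr ⟨(PySem.Set.mem_ofList _ _).mpr hc, hb⟩))

-- ===== VERDICT (by name: the statement is the Claim_ definition above) =====
theorem detect_non_numeric_columns_spec : Claim_equal_detect_non_numeric_columns := by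
  unfold Claim_equal_detect_non_numeric_columns
  intro csv numeric _ hpre
  unfold Spec_detect_non_numeric_columns
  unfold detect_non_numeric_columns detect_non_numeric_columns_alt
  apply PySem.List.foldl_congr_mem
  intro acc c hc
  rw [aScanCol_eq csv c acc (noRaise_of_pre csv c (hpre c hc))]
  rw [flagged_contains csv numeric c hc]
  rcases hb : anyBad csv c with _ | _
  · simp
  · simp only [Bool.true_and]
    by_cases hm : acc.contains c = true
    · simp
    · simp only [Bool.not_eq_true] at hm
      simp
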